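-- pv_equiv track=rewrite | github.com/makr-code/VCC-PKI | src/code_manifest.py | _remove_existing_manifest
-- ===== SOURCE A (Python) =====
-- MANIFEST_MARKER = "# VCC-MANIFEST:"
--
-- def _remove_existing_manifest(source_code: str) -> str:
--     """Remove existing manifest from source code."""
--     lines = source_code.split('\n')
--     result = []
--     skip_manifest = False
--
--     for line in lines:
--         if line.startswith(MANIFEST_MARKER):
--             skip_manifest = True
--             continue
--         elif skip_manifest and line.startswith('#'):
--             continue
--         else:
--             skip_manifest = False
--             result.append(line)
--
--     return '\n'.join(result).lstrip('\n')
-- ===== SOURCE B (Python) =====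
-- MANIFEST_MARKER = "# VCC-MANIFEST:"
--
-- def _remove_existing_manifest(source_code: str) -> str:
--     """Remove existing manifest from source code."""
--     lines = source_code.split('\n')
--
--     def in_block(prefix_rev):
--         # a line belongs to a manifest block iff, walking upward through
--         # contiguous '#' lines, a marker line appears
--         for prev in prefix_rev:
--             if not prev.startswith('#'):
--                 return False
--             if prev.startswith(MANIFEST_MARKER):
--                 return True
--         return False
--
--     kept = [line for i, line in enumerate(lines)
--             if not in_block(lines[:i + 1][::-1])]
--     return '\n'.join(kept).lstrip('\n')
-- ===== Notes on version B (the rewrite author's own statement) =====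
-- stated objective: alternative
-- what changed: Replaces A's stateful single pass with a carried skip flag by a stateless filter: each line is kept or dropped by a per-line predicate that scans its reversed prefix through contiguous comment lines looking for a manifest marker, so no skip state is threaded through the scan (B is O(n^2) worst case, a deliberate trade for the declarative form).
import Mathlib
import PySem

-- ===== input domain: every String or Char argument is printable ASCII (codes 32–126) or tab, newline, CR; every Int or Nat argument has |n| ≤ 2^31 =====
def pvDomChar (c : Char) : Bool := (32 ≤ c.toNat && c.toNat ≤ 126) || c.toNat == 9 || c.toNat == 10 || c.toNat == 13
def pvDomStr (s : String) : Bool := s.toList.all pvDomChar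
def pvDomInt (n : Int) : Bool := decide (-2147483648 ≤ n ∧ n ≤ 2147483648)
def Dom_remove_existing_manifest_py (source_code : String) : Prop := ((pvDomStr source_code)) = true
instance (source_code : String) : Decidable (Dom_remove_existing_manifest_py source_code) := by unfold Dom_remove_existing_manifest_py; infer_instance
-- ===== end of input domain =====

-- B replaces A's stateful skip-flag pass by a stateless filter with a per-line predicate on
-- the line's reversed prefix (objective: alternative; B is quadratic worst case, not faster).

-- shared framing, as in both Pythons:
-- source_code.split('\n'): Str.split? is exact; the separator "\n" is non-empty so split? is
-- always `some` and the `.getD []` default never fires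
def pvSplitLines (s : String) : List String := (PySem.Str.split? s "\n").getD []
-- .lstrip('\n') ported by hand: exact, since the strip set is the single character '\n'
def pvLstripNl (s : String) : String := String.ofList (s.toList.dropWhile (· == '\n'))

-- ===== PORT A =====
-- the for loop with its (skip_manifest, result) state, as a foldl over the lines
def remove_existing_manifest_py (source_code : String) : String :=
  let lines := pvSplitLines source_code
  let st := lines.foldl (fun (st : Bool × List String) line =>
      if PySem.Str.startswith line "# VCC-MANIFEST:" then (true, st.2)
      else if st.1 && PySem.Str.startswith line "#" then st
      else (false, st.2 ++ [line])) (false, [])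
  pvLstripNl (PySem.Str.join "\n" st.2)

-- ===== PORT B =====
-- in_block(prefix_rev): the for loop over the reversed prefix, branch order as in Source B
def pvInBlock : List String → Bool
  | [] => false
  | prev :: rest =>
    if !(PySem.Str.startswith prev "#") then false
    else if PySem.Str.startswith prev "# VCC-MANIFEST:" then true
    else pvInBlock rest

-- the comprehension over enumerate(lines); lines[:i+1] is PySem.List.slice, and
-- [::-1] is List.reverse (exact: PySem.List.slice?_none_none_neg_one)
def remove_existing_manifest_py_alt (source_code : String) : String :=
  let lines := pvSplitLines source_code
  let kept := ((PySem.List.enumerate lines 0).filter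
      (fun p => !pvInBlock ((PySem.List.slice lines none (some (p.1 + 1))).reverse))).map (·.2)
  pvLstripNl (PySem.Str.join "\n" kept)

-- ===== PRECONDITION & SPEC =====
def Spec_remove_existing_manifest_py (source_code : String) (out : String) : Prop := out = remove_existing_manifest_py_alt source_code
instance (source_code : String) (out : String) : Decidable (Spec_remove_existing_manifest_py source_code out) := by unfold Spec_remove_existing_manifest_py; infer_instance

-- ===== CLAIM (what is proved, stated in full; the proofs are below) =====
def Claim_equal_remove_existing_manifest_py : Prop := ∀ (source_code : String), Dom_remove_existing_manifest_py source_code → Spec_remove_existing_manifest_py source_code (remove_existing_manifest_py source_code)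

-- ===== LEMMAS AND PROOFS =====

lemma marker_starts_hash (l : String) (h : PySem.Str.startswith l "# VCC-MANIFEST:" = true) :
    PySem.Str.startswith l "#" = true := by
  simp only [PySem.Str.startswith_eq, PySem.Chars.startswith_iff] at *
  exact List.IsPrefix.trans (by decide) h

lemma pvInBlock_cons (l : String) (pre : List String) :
    pvInBlock (l :: pre) =
      if PySem.Str.startswith l "#" then
        (if PySem.Str.startswith l "# VCC-MANIFEST:" then true else pvInBlock pre)
      else false := by
  simp only [pvInBlock]
  cases h : PySem.Str.startswith l "#" <;> simp

-- the lines kept from the suffix `rest`, given the reversed already-read prefix `pre`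
def pvKeptFrom : List String → List String → List String
  | _, [] => []
  | pre, l :: rest =>
    (if pvInBlock (l :: pre) then [] else [l]) ++ pvKeptFrom (l :: pre) rest

-- A's fold, started with flag b = pvInBlock pre, appends exactly pvKeptFrom pre rest
lemma foldA (rest : List String) : ∀ (pre acc : List String) (b : Bool), b = pvInBlock pre →
    ((rest.foldl (fun (st : Bool × List String) line =>
      if PySem.Str.startswith line "# VCC-MANIFEST:" then (true, st.2)
      else if st.1 && PySem.Str.startswith line "#" then st
      else (false, st.2 ++ [line])) (b, acc)).2 = acc ++ pvKeptFrom pre rest) := by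
  induction rest with
  | nil => intro pre acc b _; simp only [List.foldl_nil, pvKeptFrom, List.append_nil]
  | cons l rest ih =>
    intro pre acc b hb0
    rw [List.foldl_cons, pvKeptFrom]
    by_cases hm : PySem.Str.startswith l "# VCC-MANIFEST:" = true
    · have hb : pvInBlock (l :: pre) = true := by
        rw [pvInBlock_cons, marker_starts_hash l hm, hm]; rfl
      simp only [hm, if_true, hb, List.nil_append]
      exact ih (l :: pre) acc true hb.symm
    · by_cases hh : PySem.Str.startswith l "#" = true
      · have hb : pvInBlock (l :: pre) = pvInBlock pre := by
          rw [pvInBlock_cons, hh, if_pos rfl, if_neg hm]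
        by_cases hf : b = true
        · subst hf
          have hbt : pvInBlock (l :: pre) = true := by rw [hb, ← hb0]
          simp only [hm, Bool.false_eq_true, if_false, hh, Bool.and_self, if_true,
            hbt, List.nil_append]
          exact ih (l :: pre) acc true hbt.symm
        · rw [Bool.not_eq_true] at hf
          subst hf
          have hbf : pvInBlock (l :: pre) = false := by rw [hb, ← hb0]
          simp only [hm, Bool.false_eq_true, if_false, Bool.false_and, hbf,
            List.singleton_append]
          rw [ih (l :: pre) (acc ++ [l]) false hbf.symm]
          simp
      · rw [Bool.not_eq_true] at hh
        have hbf : pvInBlock (l :: pre) = false := by rw [pvInBlock_cons, hh]; rfl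
        simp only [hm, Bool.false_eq_true, if_false, hh, Bool.and_false, hbf,
          List.singleton_append]
        rw [ih (l :: pre) (acc ++ [l]) false hbf.symm]
        simp

-- B's filtered enumeration of the suffix lines.drop k equals pvKeptFrom of the reversed prefix
lemma filterB (rest : List String) : ∀ (lines : List String) (k : Nat), lines.drop k = rest →
    (((PySem.List.enumerate rest (k : Int)).filter
      (fun p => !pvInBlock ((PySem.List.slice lines none (some (p.1 + 1))).reverse))).map (·.2))
    = pvKeptFrom ((lines.take k).reverse) rest := by
  induction rest with
  | nil => intro lines k _; simp only [PySem.List.enumerate_nil, List.filter_nil,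
      List.map_nil, pvKeptFrom]
  | cons l rest ih =>
    intro lines k hdrop
    have hk : k < lines.length := by
      by_contra h
      have hnil : List.drop k lines = [] := List.drop_eq_nil_of_le (by omega)
      rw [hnil] at hdrop
      exact List.cons_ne_nil l rest hdrop.symm
    have hget : lines[k] = l := by
      have h1 := congrArg (fun t => t[0]?) hdrop
      simp only [List.getElem?_drop, Nat.add_zero, List.getElem?_cons_zero] at h1
      rw [List.getElem?_eq_getElem hk] at h1
      exact Option.some.inj h1
    have htake : lines.take (k + 1) = lines.take k ++ [l] := by
      rw [List.take_add_one, List.getElem?_eq_getElem hk, hget]; rfl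
    have hcast : ((k : Int) + 1) = ((k + 1 : Nat) : Int) := by push_cast; ring
    have hrev : (PySem.List.slice lines none (some ((k : Int) + 1))).reverse
        = l :: (lines.take k).reverse := by
      rw [hcast, PySem.List.slice_to_natCast, htake, List.reverse_append,
        List.reverse_singleton, List.singleton_append]
    have hrec : lines.drop (k + 1) = rest := by
      have h2 : lines.drop (k + 1) = (lines.drop k).drop 1 := by
        rw [List.drop_drop, Nat.add_comm]
      rw [h2, hdrop, List.drop_one, List.tail_cons]
    have h3 := ih lines (k + 1) hrec
    rw [htake, List.reverse_append, List.reverse_singleton, List.singleton_append] at h3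
    rw [PySem.List.enumerate_cons, List.filter_cons]
    by_cases hb : pvInBlock (l :: (lines.take k).reverse) = true
    · simp only [hrev, hb, Bool.not_true, Bool.false_eq_true, if_false]
      rw [pvKeptFrom, hb, if_pos rfl, List.nil_append, ← h3, hcast]
    · rw [Bool.not_eq_true] at hb
      simp only [hrev, hb, Bool.not_false, if_true, List.map_cons]
      rw [pvKeptFrom, hb]
      simp only [Bool.false_eq_true, if_false, List.singleton_append]
      rw [← h3, hcast]

-- ===== VERDICT (by name: the statement is the Claim_ definition above) =====
theorem remove_existing_manifest_py_spec : Claim_equal_remove_existing_manifest_py := by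
  intro s _
  unfold Spec_remove_existing_manifest_py remove_existing_manifest_py remove_existing_manifest_py_alt
  show pvLstripNl (PySem.Str.join "\n"
      ((List.foldl _ ((false : Bool), ([] : List String)) (pvSplitLines s)).2)) = _
  rw [foldA (pvSplitLines s) [] [] false rfl, List.nil_append]
  have hF := filterB (pvSplitLines s) (pvSplitLines s) 0 (by simp)
  simp only [Nat.cast_zero, List.take_zero, List.reverse_nil] at hF
  rw [← hF]
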